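-- pv_equiv track=rewrite | github.com/YosefLab/Cassiopeia | cassiopeia/TreeSolver/alg_utils.py | num_incorrect
-- ===== SOURCE A (Python) =====
-- def num_incorrect(S, h):
--     num = 0
--     for i in range(int(2**h/2)):
--         if not i in S:
--             num += 1
--
--     for i in range(int(2**h/2), 2**h):
--         if i in S:
--             num += 1
--
--     return min(num, 2**h - num)
-- ===== SOURCE B (Python) =====
-- def num_incorrect(S, h):
--     n = 2 ** h
--     half = n // 2
--     lo = 0
--     hi = 0
--     for x in set(S):
--         if 0 <= x < half:
--             lo += 1
--         elif half <= x < n: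
--             hi += 1
--     num = (half - lo) + hi
--     return min(num, n - num)
-- ===== Notes on version B (the rewrite author's own statement) =====
-- stated objective: alternative
-- what changed: Instead of scanning every integer in [0, 2**h) and testing list membership, B iterates once over the distinct elements of S, buckets them into the two halves, and derives the mismatch count arithmetically.
import Mathlib
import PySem

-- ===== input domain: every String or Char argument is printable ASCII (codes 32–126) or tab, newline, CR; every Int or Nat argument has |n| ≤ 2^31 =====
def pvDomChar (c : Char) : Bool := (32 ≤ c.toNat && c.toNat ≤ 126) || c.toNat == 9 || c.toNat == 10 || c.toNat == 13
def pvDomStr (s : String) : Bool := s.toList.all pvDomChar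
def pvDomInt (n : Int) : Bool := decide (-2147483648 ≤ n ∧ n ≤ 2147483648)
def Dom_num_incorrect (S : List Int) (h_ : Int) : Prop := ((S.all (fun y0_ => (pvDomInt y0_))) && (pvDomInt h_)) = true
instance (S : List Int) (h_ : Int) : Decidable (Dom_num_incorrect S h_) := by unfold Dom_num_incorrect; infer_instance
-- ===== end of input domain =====

-- B replaces A's scan of all of [0, 2**h) by one pass over set(S), bucketing by half and counting arithmetically.

-- ===== PORT A =====
-- A: count i in [0, 2^h/2) not in S, then i in [2^h/2, 2^h) in S; return min(num, 2^h - num).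
def num_incorrect (S : List Int) (h_ : Int) : Int :=
  let n : Int := 2 ^ h_.toNat
  let half : Int := n / 2
  let num1 : Int :=
    (PySem.List.pyRange 0 half 1).foldl (fun num i => if ¬ (i ∈ S) then num + 1 else num) 0
  let num2 : Int :=
    (PySem.List.pyRange half n 1).foldl (fun num i => if i ∈ S then num + 1 else num) num1
  min num2 (n - num2)

-- ===== PORT B =====
-- B: one pass over set(S), bucketing elements into the two halves; counts derived arithmetically.
def num_incorrect_alt (S : List Int) (h_ : Int) : Int :=
  let n : Int := 2 ^ h_.toNat
  let half : Int := n / 2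
  let p : Int × Int :=
    (PySem.Set.ofList S).foldl
      (fun acc x =>
        if 0 ≤ x ∧ x < half then (acc.1 + 1, acc.2)
        else if half ≤ x ∧ x < n then (acc.1, acc.2 + 1)
        else acc)
      (0, 0)
  let num : Int := (half - p.1) + p.2
  min num (n - num)

-- ===== PRECONDITION & SPEC =====
-- Pre_ excludes exactly the inputs on which Python A raises: h < 0 (TypeError: range on a
-- float, since 2**h is a float) and h > 1024 (OverflowError in int(2**h/2)).
def Pre_num_incorrect (S : List Int) (h_ : Int) : Prop := 0 ≤ h_ ∧ h_ ≤ 1024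
instance (S : List Int) (h_ : Int) : Decidable (Pre_num_incorrect S h_) := by
  unfold Pre_num_incorrect; infer_instance

def pvWitness_num_incorrect : List Int × Int := ([0, 2, 3], 2)

def Spec_num_incorrect (S : List Int) (h_ : Int) (out : Int) : Prop := out = num_incorrect_alt S h_
instance (S : List Int) (h_ : Int) (out : Int) : Decidable (Spec_num_incorrect S h_ out) := by
  unfold Spec_num_incorrect; infer_instance

-- ===== CLAIM (what is proved, stated in full; the proofs are below) =====
def Claim_equal_num_incorrect : Prop := ∀ (S : List Int) (h_ : Int), Dom_num_incorrect S h_ → Pre_num_incorrect S h_ → Spec_num_incorrect S h_ (num_incorrect S h_)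

-- ===== LEMMAS AND PROOFS =====

-- Counting members of S in [a,b) by scanning the range equals counting by scanning set(S).
theorem countRange_eq_countSet (S : List Int) (a b : Int) :
    (PySem.List.pyRange a b 1).countP (fun i => decide (i ∈ S)) =
      (PySem.Set.ofList S).countP (fun x => decide (a ≤ x ∧ x < b)) := by
  have h1 : ((PySem.List.pyRange a b 1).filter (fun i => decide (i ∈ S))).Nodup :=
    (PySem.List.nodup_pyRange_one a b).filter _
  have h2 : ((PySem.Set.ofList S).filter (fun x => decide (a ≤ x ∧ x < b))).Nodup :=
    (PySem.Set.nodup_ofList S).filter _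
  have hperm : List.Perm
      ((PySem.List.pyRange a b 1).filter (fun i => decide (i ∈ S)))
      ((PySem.Set.ofList S).filter (fun x => decide (a ≤ x ∧ x < b))) := by
    rw [List.perm_ext_iff_of_nodup h1 h2]
    intro x
    simp [List.mem_filter, PySem.List.mem_pyRange_one, PySem.Set.mem_ofList]
    tauto
  simpa [List.countP_eq_length_filter] using hperm.length_eq

-- B's two-accumulator fold computes the two bucket counts (conditions assumed disjoint).
theorem foldl_buckets (P Q : Int → Prop) [DecidablePred P] [DecidablePred Q]
    (hd : ∀ x, P x → ¬ Q x) :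
    ∀ (l : List Int) (a b : Int),
      l.foldl
        (fun (acc : Int × Int) x =>
          if P x then (acc.1 + 1, acc.2) else if Q x then (acc.1, acc.2 + 1) else acc)
        (a, b) =
      (a + (l.countP fun x => decide (P x) : Nat), b + (l.countP fun x => decide (Q x) : Nat)) := by
  intro l
  induction l with
  | nil => intro a b; simp
  | cons y t ih =>
    intro a b
    by_cases hP : P y
    · have hQ : ¬ Q y := hd y hP
      simp [List.foldl_cons, hP, hQ, ih]
      ring
    · by_cases hQ : Q y
      · simp [List.foldl_cons, hP, hQ, ih]
        ring
      · simp [List.foldl_cons, hP, hQ, ih]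

theorem num_incorrect_eq_alt (S : List Int) (h_ : Int) :
    num_incorrect S h_ = num_incorrect_alt S h_ := by
  unfold num_incorrect num_incorrect_alt
  dsimp only
  set n : Int := 2 ^ h_.toNat with hn
  set half : Int := n / 2 with hhalf
  have hn0 : 0 < n := by positivity
  have hhalf0 : 0 ≤ half := by
    rw [hhalf]; exact Int.ediv_nonneg (le_of_lt hn0) (by norm_num)
  have hA1 :
      (PySem.List.pyRange 0 half 1).foldl
        (fun num i => if ¬ (i ∈ S) then num + 1 else num) (0 : Int) =
      ((PySem.List.pyRange 0 half 1).countP (fun i => decide (¬ i ∈ S)) : Nat) := by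
    simpa using PySem.List.foldl_ite_add_one (fun i => ¬ i ∈ S)
      (PySem.List.pyRange 0 half 1) 0
  have hA2 : ∀ (c : Int),
      (PySem.List.pyRange half n 1).foldl
        (fun num i => if i ∈ S then num + 1 else num) c =
      c + ((PySem.List.pyRange half n 1).countP (fun i => decide (i ∈ S)) : Nat) := by
    intro c
    simpa using PySem.List.foldl_ite_add_one (fun i => i ∈ S)
      (PySem.List.pyRange half n 1) c
  have hlen : ((PySem.List.pyRange 0 half 1).length : Int) = half := by
    rw [PySem.List.length_pyRange_one]
    simpa using Int.toNat_of_nonneg hhalf0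
  have hsplit :
      ((PySem.List.pyRange 0 half 1).countP (fun i => decide (¬ i ∈ S)) : Int) =
        half - ((PySem.List.pyRange 0 half 1).countP (fun i => decide (i ∈ S)) : Nat) := by
    have htot := List.length_eq_countP_add_countP (p := fun i => decide (i ∈ S))
      (l := PySem.List.pyRange 0 half 1)
    have hc : (PySem.List.pyRange 0 half 1).countP (fun i => ¬ decide (i ∈ S)) =
        (PySem.List.pyRange 0 half 1).countP (fun i => decide (¬ i ∈ S)) := by
      apply List.countP_congr; intro x _; simp
    omega
  have hc1 := countRange_eq_countSet S 0 half
  have hc2 := countRange_eq_countSet S half n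
  have hB := foldl_buckets (fun x => 0 ≤ x ∧ x < half) (fun x => half ≤ x ∧ x < n)
      (by intro x hx hy; omega) (PySem.Set.ofList S) 0 0
  rw [hA1, hA2, hB, hsplit, hc1, hc2]
  omega

-- ===== VERDICT (by name: the statement is the Claim_ definition above) =====
theorem num_incorrect_spec : Claim_equal_num_incorrect := by
  intro S h_ _ _
  unfold Spec_num_incorrect
  exact num_incorrect_eq_alt S h_
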